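-- pv_equiv track=rewrite | github.com/Shrirealstar/learning | Quant_apt/Chapter_1/Divisibility_of_11.py | digit_odd_and_even
-- ===== SOURCE A (Python) =====
-- def digit_odd_and_even(number):
--     number_str = str(number)
--     even_sum = 0
--     odd_sum = 0
--
--     for i in range(len(number_str)):
--         digit = int(number_str[i])
--
--         if i % 2 == 0:
--             even_sum += digit
--         else:
--             odd_sum += digit
--
--     return even_sum, odd_sum
-- ===== SOURCE B (Python) =====
-- def digit_odd_and_even(number):
--     even_sum, odd_sum = 0, 0
--     n = number
--     while n > 0:
--         even_sum, odd_sum = odd_sum + n % 10, even_sum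
--         n //= 10
--     return even_sum, odd_sum
-- ===== Notes on version B (the rewrite author's own statement) =====
-- stated objective: alternative
-- what changed: B replaces the string conversion plus indexed loop with a parity branch by a pure-arithmetic loop (n % 10, n //= 10) that swaps the two running sums each step, so no string, no indexing and no parity branch are needed.
import Mathlib
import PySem

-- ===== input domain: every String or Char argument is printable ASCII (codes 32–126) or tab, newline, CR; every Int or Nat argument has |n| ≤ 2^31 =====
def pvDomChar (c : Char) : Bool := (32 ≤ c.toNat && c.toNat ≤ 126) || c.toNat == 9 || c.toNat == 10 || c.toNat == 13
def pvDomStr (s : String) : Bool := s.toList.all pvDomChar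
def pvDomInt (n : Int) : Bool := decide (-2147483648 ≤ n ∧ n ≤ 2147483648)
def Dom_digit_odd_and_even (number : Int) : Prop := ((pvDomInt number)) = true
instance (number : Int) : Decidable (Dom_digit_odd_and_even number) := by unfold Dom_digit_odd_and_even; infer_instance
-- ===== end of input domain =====

-- B replaces str(number) + an indexed loop with a parity branch by a pure-arithmetic digit loop
-- that swaps the two running sums each step (objective: alternative algorithm).

-- ===== PORT A =====
-- str(number) ported as its character list (PySem.Int.toChars = (str(n)).toList);
-- number_str[i] via pyGetD (i is always in range here); int(...) via ofChars?, whose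
-- none case (ValueError on '-') is excluded by Pre_, so .getD 0 is unreachable under Pre_.
def digit_odd_and_even (number : Int) : Int × Int :=
  let number_str := PySem.Int.toChars number
  (PySem.List.pyRange 0 (PySem.List.len number_str) 1).foldl
    (fun p i =>
      let digit := (PySem.Int.ofChars? [PySem.List.pyGetD number_str i ' ']).getD 0
      if PySem.Int.mod i 2 = 0 then (p.1 + digit, p.2) else (p.1, p.2 + digit))
    (0, 0)

-- ===== PORT B =====
def pvAltLoop (n even_sum odd_sum : Int) : Int × Int :=
  if 0 < n then
    pvAltLoop (PySem.Int.floordiv n 10) (odd_sum + PySem.Int.mod n 10) even_sum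
  else (even_sum, odd_sum)
termination_by n.toNat
decreasing_by
  rw [PySem.Int.floordiv_eq_ediv_of_pos (by norm_num)]
  omega

def digit_odd_and_even_alt (number : Int) : Int × Int :=
  pvAltLoop number 0 0

-- ===== PRECONDITION & SPEC =====
-- Pre_ excludes exactly the negative inputs: there str(number) starts with '-' and
-- A raises ValueError at int('-').
def Pre_digit_odd_and_even (number : Int) : Prop := 0 ≤ number
instance (number : Int) : Decidable (Pre_digit_odd_and_even number) := by unfold Pre_digit_odd_and_even; infer_instance
def pvWitness_digit_odd_and_even : Int := 123

def Spec_digit_odd_and_even (number : Int) (out : Int × Int) : Prop := out = digit_odd_and_even_alt number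
instance (number : Int) (out : Int × Int) : Decidable (Spec_digit_odd_and_even number out) := by unfold Spec_digit_odd_and_even; infer_instance

-- ===== CLAIM (what is proved, stated in full; the proofs are below) =====
def Claim_equal_digit_odd_and_even : Prop := ∀ (number : Int), Dom_digit_odd_and_even number → Pre_digit_odd_and_even number → Spec_digit_odd_and_even number (digit_odd_and_even number)

-- ===== LEMMAS AND PROOFS =====

-- digit value of a character, as A computes it
def pvDv (c : Char) : Int := (PySem.Int.ofChars? [c]).getD 0

-- (even-position sum, odd-position sum) of a character list, structurally from the left
def pvEo : List Char → Int × Int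
  | [] => (0, 0)
  | c :: t => (pvDv c + (pvEo t).2, (pvEo t).1)

-- B's loop, abstracted to the LSB-first digit list
def pvG : List Nat → Int → Int → Int × Int
  | [], a, b => (a, b)
  | d :: t, a, b => pvG t (b + (d : Int)) a

theorem pvEo_append (l : List Char) (c : Char) :
    pvEo (l ++ [c]) =
      if l.length % 2 = 0 then ((pvEo l).1 + pvDv c, (pvEo l).2)
      else ((pvEo l).1, (pvEo l).2 + pvDv c) := by
  induction l with
  | nil => simp [pvEo]
  | cons x t ih =>
    simp only [List.cons_append, pvEo, ih, List.length_cons]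
    rcases Nat.even_or_odd t.length with h | h
    · have h0 : t.length % 2 = 0 := Nat.even_iff.mp h
      have h1 : (t.length + 1) % 2 ≠ 0 := by omega
      simp [h0, h1]
    · have h0 : t.length % 2 ≠ 0 := by have := Nat.odd_iff.mp h; omega
      have h1 : (t.length + 1) % 2 = 0 := by have := Nat.odd_iff.mp h; omega
      simp [h0, h1]
      ring

theorem pvG_shift (t : List Nat) : ∀ a b : Int,
    pvG t a b =
      if t.length % 2 = 0 then ((pvG t 0 0).1 + a, (pvG t 0 0).2 + b)
      else ((pvG t 0 0).1 + b, (pvG t 0 0).2 + a) := by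
  induction t with
  | nil => intro a b; simp [pvG]
  | cons d s ih =>
    intro a b
    simp only [pvG, List.length_cons]
    rw [ih (b + d) a, ih (0 + d) 0]
    rcases Nat.even_or_odd s.length with h | h
    · have h0 : s.length % 2 = 0 := Nat.even_iff.mp h
      have h1 : (s.length + 1) % 2 ≠ 0 := by omega
      simp [h0, h1] <;> ring
    · have h0 : s.length % 2 ≠ 0 := by have := Nat.odd_iff.mp h; omega
      have h1 : (s.length + 1) % 2 = 0 := by have := Nat.odd_iff.mp h; omega
      simp [h0, h1] <;> ring

theorem pvDv_digitChar (d : Nat) (hd : d < 10) : pvDv (Nat.digitChar d) = (d : Int) := by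
  interval_cases d <;> decide

-- bridge: A's positional sums on the printed digits = B's swap-fold on the LSB-first digits
theorem pvEo_eq_pvG (ds : List Nat) (hds : ∀ d ∈ ds, d < 10) :
    pvEo (ds.reverse.map Nat.digitChar) = pvG ds 0 0 := by
  induction ds with
  | nil => simp [pvEo, pvG]
  | cons d t ih =>
    have hd : d < 10 := hds d (by simp)
    have ht : ∀ x ∈ t, x < 10 := fun x hx => hds x (by simp [hx])
    simp only [List.reverse_cons, List.map_append, List.map_cons, List.map_nil]
    rw [pvEo_append, ih ht, pvDv_digitChar d hd]
    simp only [pvG, List.length_map, List.length_reverse]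
    rw [pvG_shift t (0 + (d : Int)) 0]
    by_cases h : t.length % 2 = 0 <;> simp [h] <;> ring

-- B's loop on a nonnegative integer is the swap-fold on its decimal digits
theorem pvAltLoop_eq_pvG (m : Nat) : ∀ a b : Int, pvAltLoop (m : Int) a b = pvG (Nat.digits 10 m) a b := by
  induction m using Nat.strong_induction_on with
  | _ m ih =>
    intro a b
    rcases Nat.eq_zero_or_pos m with h0 | h0
    · subst h0; rw [pvAltLoop]; simp [pvG]
    · rw [pvAltLoop]
      have hpos : (0 : Int) < (m : Int) := by exact_mod_cast h0
      rw [if_pos hpos]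
      have hfd : PySem.Int.floordiv (m : Int) 10 = ((m / 10 : Nat) : Int) := by
        exact_mod_cast PySem.Int.floordiv_natCast m 10
      have hmd : PySem.Int.mod (m : Int) 10 = ((m % 10 : Nat) : Int) := by
        exact_mod_cast PySem.Int.mod_natCast m 10
      rw [hfd, hmd, ih (m / 10) (Nat.div_lt_self h0 (by norm_num))]
      rw [Nat.digits_def' (by norm_num : 1 < 10) h0]
      simp [pvG]

-- toDigitsCore (the engine of str(n) for n ≥ 0) prints the reversed digit list
theorem pvToDigitsCore_eq (m : Nat) : ∀ (fuel : Nat) (acc : List Char), m < fuel →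
    Nat.toDigitsCore 10 fuel m acc =
      (if m = 0 then ['0'] else (Nat.digits 10 m).reverse.map Nat.digitChar) ++ acc := by
  induction m using Nat.strong_induction_on with
  | _ m ih =>
    intro fuel acc hfuel
    cases fuel with
    | zero => omega
    | succ f =>
      rw [Nat.toDigitsCore]
      by_cases hsmall : m / 10 = 0
      · have hm : m < 10 := by omega
        simp only [hsmall, if_true]
        rcases Nat.eq_zero_or_pos m with h0 | h0
        · subst h0; simp; decide
        · have hdig : Nat.digits 10 m = [m] := by
            rw [Nat.digits_def' (by norm_num : 1 < 10) h0, Nat.mod_eq_of_lt hm, hsmall]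
            simp
          have hm0 : m ≠ 0 := by omega
          simp [hdig, hm0, Nat.mod_eq_of_lt hm]
      · have hm10 : 10 ≤ m := by by_contra h; exact hsmall (Nat.div_eq_of_lt (by omega))
        simp only [hsmall, if_false]
        have hlt : m / 10 < m := Nat.div_lt_self (by omega) (by norm_num)
        have hflt : m / 10 < f := by
          have := Nat.div_le_self m 10
          omega
        rw [ih (m / 10) hlt f (Nat.digitChar (m % 10) :: acc) hflt]
        have hm0 : m ≠ 0 := by omega
        simp only [hsmall, hm0]
        rw [Nat.digits_def' (by norm_num : 1 < 10) (by omega : 0 < m)]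
        simp

theorem pvToChars_eq (m : Nat) :
    PySem.Int.toChars (m : Int) =
      (if m = 0 then ['0'] else (Nat.digits 10 m).reverse.map Nat.digitChar) := by
  have h : ¬ ((m : Int) < 0) := by omega
  simp only [PySem.Int.toChars, if_neg h, Int.toNat_natCast, Nat.toDigits]
  rw [pvToDigitsCore_eq m (m + 1) [] (by omega)]
  simp

-- A's indexed loop over a character list computes pvEo
theorem pvALoop_enum (cs : List Char) : ∀ (s es os : Int),
    (PySem.List.enumerate cs s).foldl
      (fun (p : Int × Int) (ic : Int × Char) =>
        let digit := (PySem.Int.ofChars? [ic.2]).getD 0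
        if PySem.Int.mod ic.1 2 = 0 then (p.1 + digit, p.2) else (p.1, p.2 + digit))
      (es, os) =
      if PySem.Int.mod s 2 = 0 then (es + (pvEo cs).1, os + (pvEo cs).2)
      else (es + (pvEo cs).2, os + (pvEo cs).1) := by
  induction cs with
  | nil => intro s es os; by_cases h : PySem.Int.mod s 2 = 0 <;> simp [PySem.List.enumerate, pvEo]
  | cons c t ih =>
    intro s es os
    rw [PySem.List.enumerate_cons]
    have hmod : PySem.Int.mod s 2 = s % 2 := PySem.Int.mod_eq_emod_of_pos (by norm_num)
    have hmod1 : PySem.Int.mod (s + 1) 2 = (s + 1) % 2 := PySem.Int.mod_eq_emod_of_pos (by norm_num)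
    by_cases h : s % 2 = 0
    · have h1 : (s + 1) % 2 ≠ 0 := by omega
      simp only [List.foldl_cons, hmod, h]
      rw [ih (s + 1)]
      simp only [hmod1, h1, pvEo]
      simp [pvDv] <;> ring
    · have h1 : (s + 1) % 2 = 0 := by omega
      simp only [List.foldl_cons, hmod, h]
      rw [ih (s + 1)]
      simp only [hmod1, h1, pvEo]
      simp [pvDv] <;> ring

theorem pvA_eq_pvEo (number : Int) :
    digit_odd_and_even number = pvEo (PySem.Int.toChars number) := by
  simp only [digit_odd_and_even, PySem.List.len_eq]
  set cs := PySem.Int.toChars number with hcs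
  have henum : PySem.List.enumerate cs 0 =
      (PySem.List.pyRange 0 (cs.length : Int) 1).map (fun j => (j, PySem.List.pyGetD cs j ' ')) := by
    rw [← PySem.List.len_eq]
    exact PySem.List.enumerate_eq_map_pyRange cs ' '
  rw [show (PySem.List.pyRange 0 (cs.length : Int) 1).foldl
      (fun p i =>
        let digit := (PySem.Int.ofChars? [PySem.List.pyGetD cs i ' ']).getD 0
        if PySem.Int.mod i 2 = 0 then (p.1 + digit, p.2) else (p.1, p.2 + digit)) ((0 : Int), (0 : Int)) =
      ((PySem.List.pyRange 0 (cs.length : Int) 1).map (fun j => (j, PySem.List.pyGetD cs j ' '))).foldl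
      (fun (p : Int × Int) (ic : Int × Char) =>
        let digit := (PySem.Int.ofChars? [ic.2]).getD 0
        if PySem.Int.mod ic.1 2 = 0 then (p.1 + digit, p.2) else (p.1, p.2 + digit)) ((0 : Int), (0 : Int))
    from by rw [List.foldl_map]]
  rw [← henum, pvALoop_enum cs 0 0 0]
  norm_num [PySem.Int.mod]

-- ===== VERDICT (by name: the statement is the Claim_ definition above) =====
theorem digit_odd_and_even_spec : Claim_equal_digit_odd_and_even := by
  intro number _ hpre
  have hnn : 0 ≤ number := hpre
  unfold Spec_digit_odd_and_even digit_odd_and_even_alt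
  rw [pvA_eq_pvEo]
  obtain ⟨m, rfl⟩ : ∃ m : Nat, number = (m : Int) := ⟨number.toNat, by omega⟩
  rw [pvToChars_eq m, pvAltLoop_eq_pvG m 0 0]
  rcases Nat.eq_zero_or_pos m with h0 | h0
  · subst h0
    decide
  · have hm0 : m ≠ 0 := by omega
    rw [if_neg hm0]
    exact pvEo_eq_pvG (Nat.digits 10 m) (fun d hd => Nat.digits_lt_base (by norm_num) hd)
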